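-- pv_equiv track=rewrite | github.com/JiHaoyu1997/snam_robot | src/vpa_robot_vision/scripts/hsv/search_pattern.py | _break_segs
-- ===== SOURCE A (Python) =====
-- def _break_segs(numbers: list,max_gap=5):
--
--     segements = {}
--
--     segement_number = 0
--     current_segement = []
--
--     for index, i in enumerate(numbers):
--
--         if not current_segement:
--             current_segement.append(i)
--         else:
--             if i <= numbers[index-1] + max_gap:
--                 # IN
--                 current_segement.append(i)
--             else:
--                 if len(current_segement) > 3:
--                     segements[segement_number] = current_segement
--                     segement_number += 1
--                 current_segement = [i]
--
--     if len(current_segement) > 5: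
--         segements[segement_number] = current_segement
--
--     return segements
-- ===== SOURCE B (Python) =====
-- def _break_segs(numbers: list, max_gap=5):
--     # Pass 1: split into maximal runs (new run when the gap to the previous element exceeds max_gap).
--     runs = []
--     for x in numbers:
--         if runs and x <= runs[-1][-1] + max_gap:
--             runs[-1].append(x)
--         else:
--             runs.append([x])
--     # Pass 2: keep non-final runs longer than 3 and a final run longer than 5, numbering kept runs.
--     segs = {}
--     key = 0
--     for run in runs[:-1]:
--         if len(run) > 3:
--             segs[key] = run
--             key += 1
--     if runs and len(runs[-1]) > 5:
--         segs[key] = runs[-1]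
--     return segs
-- ===== Notes on version B (the rewrite author's own statement) =====
-- stated objective: alternative
-- what changed: B replaces A's single stateful loop (current segment + pending counter + end-of-loop special case) by two independent passes: one that splits the input into maximal runs, and one that filters/numbers the runs with the >3 (non-final) / >5 (final) thresholds.
import Mathlib
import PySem

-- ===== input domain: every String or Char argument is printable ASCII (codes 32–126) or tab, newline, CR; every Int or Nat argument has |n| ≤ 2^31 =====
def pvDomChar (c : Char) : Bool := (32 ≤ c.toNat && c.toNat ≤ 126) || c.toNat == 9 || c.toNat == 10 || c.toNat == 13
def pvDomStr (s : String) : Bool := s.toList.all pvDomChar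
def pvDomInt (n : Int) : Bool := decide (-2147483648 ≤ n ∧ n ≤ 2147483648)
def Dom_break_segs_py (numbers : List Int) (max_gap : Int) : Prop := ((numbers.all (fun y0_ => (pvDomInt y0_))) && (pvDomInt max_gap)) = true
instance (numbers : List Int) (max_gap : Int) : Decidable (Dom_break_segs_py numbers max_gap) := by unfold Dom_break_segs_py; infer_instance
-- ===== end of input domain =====

-- B groups via two independent passes (build maximal runs, then filter/number them) instead of A's
-- single stateful loop; proved to return the same dict (as an association list) on every input.

-- ===== PORT A =====
-- A's loop over enumerate(numbers); state = (segements dict, segement_number, current_segement).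
-- numbers[index-1] is ported as pyGetD with default 0: in the branch where it is evaluated
-- current_segement is nonempty, hence index >= 1 and the access is always in range.
def pvStepA (numbers : List Int) (max_gap : Int)
    (st : PySem.Dict Int (List Int) × Int × List Int) (p : Int × Int) :
    PySem.Dict Int (List Int) × Int × List Int :=
  if st.2.2 = [] then (st.1, st.2.1, st.2.2 ++ [p.2])
  else if p.2 ≤ PySem.List.pyGetD numbers (p.1 - 1) 0 + max_gap then
    (st.1, st.2.1, st.2.2 ++ [p.2])
  else if st.2.2.length > 3 then (st.1.insert st.2.1 st.2.2, st.2.1 + 1, [p.2])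
  else (st.1, st.2.1, [p.2])

-- The code after the loop: keep current_segement if longer than 5, return the dict's items.
def pvFinalA (st : PySem.Dict Int (List Int) × Int × List Int) : List (Int × List Int) :=
  (if st.2.2.length > 5 then st.1.insert st.2.1 st.2.2 else st.1).items

def break_segs_py (numbers : List Int) (max_gap : Int) : List (Int × List Int) :=
  pvFinalA (List.foldl (pvStepA numbers max_gap) (PySem.Dict.empty, 0, [])
    (PySem.List.enumerate numbers))

-- ===== PORT B =====
-- Pass 1 of Source B: build the list of maximal runs.  runs[-1][-1] is ported via getLast?
-- (defaults never used: every run built is nonempty).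
def pvRunsB (max_gap : Int) (numbers : List Int) : List (List Int) :=
  numbers.foldl (fun runs x =>
    match runs.getLast? with
    | some last =>
        if x ≤ last.getLast?.getD 0 + max_gap then runs.dropLast ++ [last ++ [x]]
        else runs ++ [[x]]
    | none => runs ++ [[x]]) []

-- Pass 2 of Source B: number the kept runs; the dict is the association list built by appending fresh keys.
def break_segs_py_alt (numbers : List Int) (max_gap : Int) : List (Int × List Int) :=
  let runs := pvRunsB max_gap numbers
  let st := runs.dropLast.foldl
    (fun (st : List (Int × List Int) × Int) run =>
      if run.length > 3 then (st.1 ++ [(st.2, run)], st.2 + 1) else st) ([], 0)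
  match runs.getLast? with
  | some last => if last.length > 5 then st.1 ++ [(st.2, last)] else st.1
  | none => st.1

-- ===== PRECONDITION & SPEC =====
def Spec_break_segs_py (numbers : List Int) (max_gap : Int) (out : List (Int × List Int)) : Prop := out = break_segs_py_alt numbers max_gap
instance (numbers : List Int) (max_gap : Int) (out : List (Int × List Int)) : Decidable (Spec_break_segs_py numbers max_gap out) := by unfold Spec_break_segs_py; infer_instance

-- ===== CLAIM (what is proved, stated in full; the proofs are below) =====
def Claim_equal_break_segs_py : Prop := ∀ (numbers : List Int) (max_gap : Int), Dom_break_segs_py numbers max_gap → Spec_break_segs_py numbers max_gap (break_segs_py numbers max_gap)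

-- ===== LEMMAS AND PROOFS =====

-- Common reference shape: the maximal runs of (cur ++ rest) continuing the nonempty run cur.
def pvRunsGo (g : Int) (cur : List Int) : List Int → List (List Int)
  | [] => [cur]
  | x :: rest =>
      if x ≤ cur.getLast?.getD 0 + g then pvRunsGo g (cur ++ [x]) rest
      else cur :: pvRunsGo g [x] rest

-- Common reference shape: filter/number the runs (>3 for non-final, >5 for the final run).
def pvFinish (k : Int) : List (List Int) → List (Int × List Int)
  | [] => []
  | [r] => if r.length > 5 then [(k, r)] else []
  | r :: r' :: rs =>
      if r.length > 3 then (k, r) :: pvFinish (k + 1) (r' :: rs) else pvFinish k (r' :: rs)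

theorem pvRunsGo_ne_nil (g : Int) (cur rest : List Int) : pvRunsGo g cur rest ≠ [] := by
  induction rest generalizing cur with
  | nil => simp [pvRunsGo]
  | cons x r ih =>
      simp only [pvRunsGo]
      split
      · exact ih _
      · simp

theorem pvRunsB_go (g : Int) (rest : List Int) : ∀ (acc : List (List Int)) (cur : List Int),
    rest.foldl (fun runs x =>
      match runs.getLast? with
      | some last =>
          if x ≤ last.getLast?.getD 0 + g then runs.dropLast ++ [last ++ [x]]
          else runs ++ [[x]]
      | none => runs ++ [[x]]) (acc ++ [cur]) = acc ++ pvRunsGo g cur rest := by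
  induction rest with
  | nil => intro acc cur; simp [pvRunsGo]
  | cons x r ih =>
      intro acc cur
      simp only [List.foldl_cons, List.getLast?_concat, pvRunsGo]
      split
      · rw [List.dropLast_concat]
        exact ih acc (cur ++ [x])
      · rw [ih (acc ++ [cur]) [x]]
        simp

theorem pvFinish_fold (rs : List (List Int)) : ∀ (segs : List (Int × List Int)) (k : Int),
    (match rs.getLast? with
     | some last =>
        if last.length > 5 then
          (rs.dropLast.foldl (fun (st : List (Int × List Int) × Int) run =>
            if run.length > 3 then (st.1 ++ [(st.2, run)], st.2 + 1) else st) (segs, k)).1 ++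
          [((rs.dropLast.foldl (fun (st : List (Int × List Int) × Int) run =>
            if run.length > 3 then (st.1 ++ [(st.2, run)], st.2 + 1) else st) (segs, k)).2, last)]
        else (rs.dropLast.foldl (fun (st : List (Int × List Int) × Int) run =>
            if run.length > 3 then (st.1 ++ [(st.2, run)], st.2 + 1) else st) (segs, k)).1
     | none => (rs.dropLast.foldl (fun (st : List (Int × List Int) × Int) run =>
            if run.length > 3 then (st.1 ++ [(st.2, run)], st.2 + 1) else st) (segs, k)).1)
    = segs ++ pvFinish k rs := by
  induction rs with
  | nil => intro segs k; simp [pvFinish]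
  | cons r rs ih =>
      intro segs k
      cases rs with
      | nil =>
          simp only [pvFinish, List.getLast?_singleton, List.dropLast_singleton, List.foldl_nil]
          split <;> simp
      | cons r' rs' =>
          rw [show (r :: r' :: rs').dropLast = r :: (r' :: rs').dropLast from rfl,
              List.foldl_cons, List.getLast?_cons_cons]
          by_cases h : r.length > 3
          · simp only [h, if_pos]
            rw [ih (segs ++ [(k, r)]) (k + 1)]
            simp [pvFinish, h]
          · simp only [h, if_false]
            rw [ih segs k]
            simp [pvFinish, h]

-- The value numbers[index-1] read by A's loop at the head of the suffix is the last element of the prefix.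
theorem pvPrev_eq (pre rest : List Int) (h : pre ≠ []) :
    PySem.List.pyGetD (pre ++ rest) ((pre.length : Int) - 1) 0 = pre.getLast h := by
  have hlen : 1 ≤ pre.length := List.length_pos_iff.mpr h
  have : ((pre.length : Int) - 1) = ((pre.length - 1 : Nat) : Int) := by omega
  rw [this, PySem.List.pyGetD_natCast]
  have hlt : pre.length - 1 < pre.length := by omega
  rw [List.getD_eq_getElem?_getD, List.getElem?_append_left (by omega),
      List.getElem?_eq_getElem hlt]
  simp [List.getLast_eq_getElem]

theorem pvStepA_in (numbers : List Int) (g i x k : Int) (segs : PySem.Dict Int (List Int))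
    (cur : List Int) (hcur : cur ≠ [])
    (hin : x ≤ PySem.List.pyGetD numbers (i - 1) 0 + g) :
    pvStepA numbers g (segs, k, cur) (i, x) = (segs, k, cur ++ [x]) := by
  simp [pvStepA, hcur, hin]

theorem pvStepA_out (numbers : List Int) (g i x k : Int) (segs : PySem.Dict Int (List Int))
    (cur : List Int) (hcur : cur ≠ [])
    (hin : ¬ x ≤ PySem.List.pyGetD numbers (i - 1) 0 + g) :
    pvStepA numbers g (segs, k, cur) (i, x)
      = if cur.length > 3 then (segs.insert k cur, k + 1, [x]) else (segs, k, [x]) := by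
  simp only [pvStepA]
  rw [if_neg hcur, if_neg hin]

-- A's loop over the suffix 'rest' (prefix 'pre' already consumed, current run 'cur' nonempty and
-- ending at pre's last element, all dict keys below k) computes pvFinish of the runs of cur ++ rest.
theorem pvLoopA (g : Int) (rest : List Int) :
    ∀ (pre cur : List Int) (segs : PySem.Dict Int (List Int)) (k : Int)
      (_hpre : pre ≠ []) (_ : cur ≠ [])
      (_ : cur.getLast? = pre.getLast?)
      (_ : ∀ j ∈ segs.keys, j < k),
    pvFinalA (List.foldl (pvStepA (pre ++ rest) g) (segs, k, cur)
        (PySem.List.enumerate rest (pre.length : Int)))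
      = segs.items ++ pvFinish k (pvRunsGo g cur rest) := by
  induction rest with
  | nil =>
      intro pre cur segs k _hpre hcur hlast hkeys
      have hnc : segs.contains k = false := by
        cases h : segs.contains k with
        | false => rfl
        | true =>
            exact absurd (hkeys k ((PySem.Dict.contains_iff_mem_keys segs k).mp h))
              (lt_irrefl k)
      simp only [PySem.List.enumerate_nil, List.foldl_nil, pvRunsGo, pvFinish, pvFinalA]
      split
      · rw [PySem.Dict.items_insert_of_not_contains segs cur hnc]
      · simp
  | cons x rest ih =>
      intro pre cur segs k hpre hcur hlast hkeys
      rw [PySem.List.enumerate_cons, List.foldl_cons]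
      have hprev : PySem.List.pyGetD (pre ++ x :: rest) ((pre.length : Int) - 1) 0
          = cur.getLast?.getD 0 := by
        rw [pvPrev_eq pre (x :: rest) hpre, hlast,
            List.getLast?_eq_some_getLast hpre]
        rfl
      have hpre' : pre ++ [x] ≠ [] := by simp
      have hlen' : (((pre ++ [x]).length : Nat) : Int) = (pre.length : Int) + 1 := by simp
      have happ : (pre ++ [x]) ++ rest = pre ++ x :: rest := by simp
      by_cases hin : x ≤ cur.getLast?.getD 0 + g
      · rw [pvStepA_in _ _ _ _ _ _ _ hcur (by rw [hprev]; exact hin)]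
        have h2 := ih (pre ++ [x]) (cur ++ [x]) segs k hpre' (by simp)
          (by simp) hkeys
        rw [hlen', happ] at h2
        rw [h2, show pvRunsGo g cur (x :: rest) = pvRunsGo g (cur ++ [x]) rest from by
          simp [pvRunsGo, hin]]
      · rw [pvStepA_out _ _ _ _ _ _ _ hcur (by rw [hprev]; exact hin)]
        obtain ⟨r, rs, hrs⟩ : ∃ r rs, pvRunsGo g [x] rest = r :: rs := by
          cases h : pvRunsGo g [x] rest with
          | nil => exact absurd h (pvRunsGo_ne_nil g [x] rest)
          | cons r rs => exact ⟨r, rs, rfl⟩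
        have hgoal : pvFinish k (pvRunsGo g cur (x :: rest))
            = if cur.length > 3 then (k, cur) :: pvFinish (k + 1) (r :: rs)
              else pvFinish k (r :: rs) := by
          simp [pvRunsGo, hin, hrs, pvFinish]
        by_cases h3 : cur.length > 3
        · rw [if_pos h3]
          have hnc : segs.contains k = false := by
            cases h : segs.contains k with
            | false => rfl
            | true =>
                exact absurd (hkeys k ((PySem.Dict.contains_iff_mem_keys segs k).mp h))
                  (lt_irrefl k)
          have hkeys' : ∀ j ∈ (segs.insert k cur).keys, j < k + 1 := by
            intro j hj
            rcases (PySem.Dict.mem_keys_insert segs k j cur).mp hj with h | h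
            · omega
            · have := hkeys j h; omega
          have h2 := ih (pre ++ [x]) [x] (segs.insert k cur) (k + 1) hpre'
            (by simp) (by simp) hkeys'
          rw [hlen', happ] at h2
          rw [h2, PySem.Dict.items_insert_of_not_contains segs cur hnc, hgoal, hrs]
          simp [h3]
        · rw [if_neg h3]
          have h2 := ih (pre ++ [x]) [x] segs k hpre' (by simp) (by simp) hkeys
          rw [hlen', happ] at h2
          rw [h2, hgoal, hrs]
          simp [h3]

-- ===== VERDICT (by name: the statement is the Claim_ definition above) =====
theorem break_segs_py_spec : Claim_equal_break_segs_py := by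
  intro numbers max_gap _
  show break_segs_py numbers max_gap = break_segs_py_alt numbers max_gap
  cases numbers with
  | nil => rfl
  | cons x xs =>
      have hA : break_segs_py (x :: xs) max_gap
          = pvFinish 0 (pvRunsGo max_gap [x] xs) := by
        unfold break_segs_py
        rw [PySem.List.enumerate_cons, List.foldl_cons,
            show pvStepA (x :: xs) max_gap (PySem.Dict.empty, 0, []) (0, x)
              = (PySem.Dict.empty, 0, [x]) from by simp [pvStepA]]
        have h2 := pvLoopA max_gap xs [x] [x] PySem.Dict.empty 0 (by simp) (by simp)
          rfl (by simp [PySem.Dict.keys_empty])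
        simp only [List.singleton_append, List.length_cons, List.length_nil] at h2
        rw [show ((0 : Int) + 1) = ((1 : Nat) : Int) from by norm_num] at *
        rw [h2]
        rfl
      have hB : break_segs_py_alt (x :: xs) max_gap
          = pvFinish 0 (pvRunsGo max_gap [x] xs) := by
        unfold break_segs_py_alt pvRunsB
        rw [List.foldl_cons]
        simp only [List.getLast?_nil, List.nil_append]
        rw [show ([[x]] : List (List Int)) = [] ++ [[x]] from rfl,
            pvRunsB_go max_gap xs [] [x], List.nil_append]
        have := pvFinish_fold (pvRunsGo max_gap [x] xs) [] 0
        simpa using this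
      rw [hA, hB]
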